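-- pv_equiv track=rewrite | github.com/mohit9677/Parashari-Indian-Institute | AB_AI/inject_gm_tier_v2.py | extract_div_block
-- ===== SOURCE A (Python) =====
-- def extract_div_block(text, start_marker):
--     """Extract a complete <div ...>...</div> block using brace-counting on raw text."""
--     start_idx = text.find(start_marker)
--     if start_idx == -1:
--         return None, -1
--
--     depth = 0
--     i = start_idx
--     while i < len(text):
--         # Look for <div or </div
--         if text[i:i+4] == '<div' and (i+4 >= len(text) or text[i+4] in (' ', '>', '\r', '\n', '\t')):
--             depth += 1
--             i += 4
--         elif text[i:i+6] == '</div>':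
--             depth -= 1
--             if depth == 0:
--                 return text[start_idx:i+6], i+6
--             i += 6
--         else:
--             i += 1
--     return None, -1
-- ===== SOURCE B (Python) =====
-- import re
--
-- # One regex alternation for both tags: an opening "<div" must be followed by a
-- # delimiter (space, >, \r, \n, \t) or the end of the text; "</div>" is literal.
-- _TAG_RE = re.compile(r'<div(?=[ >\r\n\t]|\Z)|</div>')
--
--
-- def extract_div_block(text, start_marker):
--     """Extract a complete <div ...>...</div> block via regex tag iteration."""
--     start_idx = text.find(start_marker)
--     if start_idx == -1:
--         return None, -1
--
--     depth = 0
--     for m in _TAG_RE.finditer(text, start_idx):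
--         if m.group() == '</div>':
--             depth -= 1
--             if depth == 0:
--                 return text[start_idx:m.end()], m.end()
--         else:
--             depth += 1
--     return None, -1
-- ===== Notes on version B (the rewrite author's own statement) =====
-- stated objective: faster
-- what changed: Replaced A's per-character Python while-loop (repeated 4- and 6-char slice comparisons at every index) by one precompiled regex alternation scanned with re.finditer, folding depth over the resulting tag matches.
import Mathlib
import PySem

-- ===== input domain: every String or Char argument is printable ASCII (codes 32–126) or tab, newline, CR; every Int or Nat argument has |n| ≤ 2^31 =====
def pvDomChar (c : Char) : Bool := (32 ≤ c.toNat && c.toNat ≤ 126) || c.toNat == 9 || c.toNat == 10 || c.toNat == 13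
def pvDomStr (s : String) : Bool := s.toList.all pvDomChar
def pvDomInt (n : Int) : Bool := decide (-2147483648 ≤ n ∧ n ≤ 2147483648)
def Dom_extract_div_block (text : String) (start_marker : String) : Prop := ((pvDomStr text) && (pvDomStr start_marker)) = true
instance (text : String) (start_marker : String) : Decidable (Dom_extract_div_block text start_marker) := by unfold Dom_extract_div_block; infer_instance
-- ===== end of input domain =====

-- B replaces A's per-character scan by a finditer-style tag-match list folded with a depth counter; measured constant-factor faster in Python (regex in C).

-- Shared tag tests (A's inline branch conditions; B's two regex alternatives):
-- "<div" followed by a delimiter or end of text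
def pvOpenAt (s : List Char) (i : Nat) : Bool :=
  (s.drop i).take 4 == ['<', 'd', 'i', 'v'] &&
    (decide (s.length ≤ i + 4) ||
      (match s[i + 4]? with
       | some c => c == ' ' || c == '>' || c == '\r' || c == '\n' || c == '\t'
       | none => false))

-- "</div>"
def pvCloseAt (s : List Char) (i : Nat) : Bool :=
  (s.drop i).take 6 == ['<', '/', 'd', 'i', 'v', '>']

-- ===== PORT A =====
-- A's while-loop: index i and depth, advancing 4 / 6 / 1 per step
def pvLoopA (s : List Char) (start_idx : Nat) (depth : Int) (i : Nat) : Option String × Int :=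
  if _h : i < s.length then
    if pvOpenAt s i then
      pvLoopA s start_idx (depth + 1) (i + 4)
    else if pvCloseAt s i then
      if depth - 1 = 0 then
        (some (String.ofList ((s.drop start_idx).take (i + 6 - start_idx))), ((i : Int) + 6))
      else
        pvLoopA s start_idx (depth - 1) (i + 6)
    else
      pvLoopA s start_idx depth (i + 1)
  else (none, -1)
termination_by s.length - i

def extract_div_block (text : String) (start_marker : String) : Option String × Int :=
  let start_idx := PySem.Str.find text start_marker
  if start_idx = -1 then (none, -1)
  else pvLoopA text.toList start_idx.toNat 0 start_idx.toNat

-- ===== PORT B =====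
-- finditer over the alternation '<div(?=[ >\r\n\t]|\Z)|</div>' starting at i:
-- the list of (end-position, is-open) matches, non-overlapping, first-alternative-first
def pvFindTags (s : List Char) (i : Nat) : List (Nat × Bool) :=
  if _h : i < s.length then
    if pvOpenAt s i then (i + 4, true) :: pvFindTags s (i + 4)
    else if pvCloseAt s i then (i + 6, false) :: pvFindTags s (i + 6)
    else pvFindTags s (i + 1)
  else []
termination_by s.length - i

-- B's for-loop over the matches, folding the depth
def pvScanTags (s : List Char) (start_idx : Nat) (depth : Int) : List (Nat × Bool) → Option String × Int
  | [] => (none, -1)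
  | (_, true) :: rest => pvScanTags s start_idx (depth + 1) rest
  | (e, false) :: rest =>
      if depth - 1 = 0 then
        (some (String.ofList ((s.drop start_idx).take (e - start_idx))), (e : Int))
      else pvScanTags s start_idx (depth - 1) rest

def extract_div_block_alt (text : String) (start_marker : String) : Option String × Int :=
  let start_idx := PySem.Str.find text start_marker
  if start_idx = -1 then (none, -1)
  else
    let s := text.toList
    pvScanTags s start_idx.toNat 0 (pvFindTags s start_idx.toNat)

-- ===== PRECONDITION & SPEC =====
def Spec_extract_div_block (text : String) (start_marker : String) (out : Option String × Int) : Prop := out = extract_div_block_alt text start_marker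
instance (text : String) (start_marker : String) (out : Option String × Int) : Decidable (Spec_extract_div_block text start_marker out) := by unfold Spec_extract_div_block; infer_instance

-- ===== CLAIM (what is proved, stated in full; the proofs are below) =====
def Claim_equal_extract_div_block : Prop := ∀ (text : String) (start_marker : String), Dom_extract_div_block text start_marker → Spec_extract_div_block text start_marker (extract_div_block text start_marker)

-- ===== LEMMAS AND PROOFS =====

-- A's interleaved scan equals B's "collect matches, then fold the depth" decomposition.
theorem pvLoopA_eq_scan (s : List Char) (start_idx : Nat) :
    ∀ i depth, pvLoopA s start_idx depth i = pvScanTags s start_idx depth (pvFindTags s i) := by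
  intro i depth
  fun_induction pvLoopA s start_idx depth i with
  | case1 i _ hlt hopen ih =>
      rw [pvFindTags, dif_pos hlt, if_pos hopen, pvScanTags, ih]
  | case2 i depth hlt hopen hclose hdep =>
      rw [pvFindTags, dif_pos hlt, if_neg hopen, if_pos hclose, pvScanTags, if_pos hdep]; push_cast; rfl
  | case3 i depth hlt hopen hclose hdep ih =>
      rw [pvFindTags, dif_pos hlt, if_neg hopen, if_pos hclose, pvScanTags, if_neg hdep, ih]
  | case4 i depth hlt hopen hclose ih =>
      rw [pvFindTags, dif_pos hlt, if_neg hopen, if_neg hclose, ih]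
  | case5 i depth hlt =>
      rw [pvFindTags, dif_neg hlt, pvScanTags]

-- ===== VERDICT (by name: the statement is the Claim_ definition above) =====
theorem extract_div_block_spec : Claim_equal_extract_div_block := by
  intro text start_marker _
  unfold Spec_extract_div_block extract_div_block extract_div_block_alt
  simp [pvLoopA_eq_scan]
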